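-- pv_equiv track=rewrite | github.com/DailyForkCast/osint-foresight | scripts/connect_real_data.py | _is_germany_china_collaboration
-- ===== SOURCE A (Python) =====
-- from typing import Dict, List, Optional, Generator
--
-- def _is_germany_china_collaboration(record: Dict) -> bool:
--     """Check if paper involves Germany-China collaboration"""
--     countries = set()
--
--     for authorship in record.get("authorships", []):
--         for inst in authorship.get("institutions", []):
--             country = inst.get("country_code", "")
--             if country:
--                 countries.add(country)
--
--     return "DE" in countries and "CN" in countries
-- ===== SOURCE B (Python) =====
-- def _is_germany_china_collaboration(record):
--     """Check if paper involves Germany-China collaboration"""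
--     def has_country(code):
--         return any(
--             inst.get("country_code", "") == code
--             for authorship in record.get("authorships", [])
--             for inst in authorship.get("institutions", [])
--         )
--
--     return has_country("DE") and has_country("CN")
-- ===== Notes on version B (the rewrite author's own statement) =====
-- stated objective: simpler
-- what changed: Drops the accumulator set: instead of one pass collecting all country codes into a set and two membership lookups, B makes two independent short-circuiting any() scans, one for DE and one for CN, maintaining no state.
import Mathlib
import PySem

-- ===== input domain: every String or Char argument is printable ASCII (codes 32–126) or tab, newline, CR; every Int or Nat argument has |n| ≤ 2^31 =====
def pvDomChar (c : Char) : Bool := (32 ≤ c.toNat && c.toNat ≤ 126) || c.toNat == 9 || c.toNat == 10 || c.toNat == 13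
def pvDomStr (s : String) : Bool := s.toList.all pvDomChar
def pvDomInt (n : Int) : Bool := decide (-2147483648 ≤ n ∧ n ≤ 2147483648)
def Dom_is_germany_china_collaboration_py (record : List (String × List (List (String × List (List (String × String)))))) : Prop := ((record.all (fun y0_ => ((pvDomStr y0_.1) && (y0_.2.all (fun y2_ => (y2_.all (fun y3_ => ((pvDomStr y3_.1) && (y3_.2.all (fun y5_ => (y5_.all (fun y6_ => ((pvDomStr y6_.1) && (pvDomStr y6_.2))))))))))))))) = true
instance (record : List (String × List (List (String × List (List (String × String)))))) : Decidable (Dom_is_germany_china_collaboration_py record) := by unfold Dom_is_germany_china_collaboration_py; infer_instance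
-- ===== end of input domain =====

-- B replaces A's collected set of country codes by two independent short-circuiting any-scans (simpler; same O(n) cost).


-- ===== PORT A =====
-- Port of A: fold the nested loops into an accumulated PySem.Set, then two membership tests.
def is_germany_china_collaboration_py (record : List (String × List (List (String × List (List (String × String)))))) : Bool :=
  let countries : PySem.Set String :=
    ((PySem.Dict.mk record).getD "authorships" []).foldl (fun cs authorship =>
      ((PySem.Dict.mk authorship).getD "institutions" []).foldl (fun cs inst =>
        let country := (PySem.Dict.mk inst).getD "country_code" ""
        if country ≠ "" then PySem.Set.add cs country else cs) cs) PySem.Set.empty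
  PySem.Set.contains countries "DE" && PySem.Set.contains countries "CN"

-- ===== PORT B =====
-- Port of B: two independent short-circuiting scans (any), no accumulator.
def pvHasCountry (record : List (String × List (List (String × List (List (String × String)))))) (code : String) : Bool :=
  ((PySem.Dict.mk record).getD "authorships" []).any (fun authorship =>
    ((PySem.Dict.mk authorship).getD "institutions" []).any (fun inst =>
      (PySem.Dict.mk inst).getD "country_code" "" == code))

def is_germany_china_collaboration_py_alt (record : List (String × List (List (String × List (List (String × String)))))) : Bool :=
  pvHasCountry record "DE" && pvHasCountry record "CN"

-- ===== PRECONDITION & SPEC =====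
def Spec_is_germany_china_collaboration_py (record : List (String × List (List (String × List (List (String × String)))))) (out : Bool) : Prop := out = is_germany_china_collaboration_py_alt record
instance (record : List (String × List (List (String × List (List (String × String)))))) (out : Bool) : Decidable (Spec_is_germany_china_collaboration_py record out) := by unfold Spec_is_germany_china_collaboration_py; infer_instance

-- ===== CLAIM (what is proved, stated in full; the proofs are below) =====
def Claim_equal_is_germany_china_collaboration_py : Prop := ∀ (record : List (String × List (List (String × List (List (String × String)))))), Dom_is_germany_china_collaboration_py record → Spec_is_germany_china_collaboration_py record (is_germany_china_collaboration_py record)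

-- ===== LEMMAS AND PROOFS =====

-- String == is decidable equality
theorem pvBeqStr (a b : String) : (a == b) = decide (a = b) := by
  by_cases h : a = b <;> simp [h]
-- inner loop: membership in the accumulated set, for a nonempty target code
theorem pvContains_inner (insts : List (List (String × String))) (cs : PySem.Set String)
    (c : String) (hc : c ≠ "") :
    PySem.Set.contains (insts.foldl (fun cs inst =>
        let country := (PySem.Dict.mk inst).getD "country_code" ""
        if country ≠ "" then PySem.Set.add cs country else cs) cs) c
      = (PySem.Set.contains cs c
         || insts.any (fun inst => (PySem.Dict.mk inst).getD "country_code" "" == c)) := by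
  induction insts generalizing cs with
  | nil => simp
  | cons i t ih =>
    simp only [List.foldl_cons, List.any_cons, ih]
    by_cases h : (PySem.Dict.mk i).getD "country_code" "" ≠ ""
    · simp [h, Bool.or_assoc, pvBeqStr, eq_comm]
    · simp only [if_neg h]
      have : ((PySem.Dict.mk i).getD "country_code" "" == c) = false := by
        simp only [ne_eq, not_not] at h
        simp [h, (Ne.symm hc)]
      simp [this]
-- outer loop
theorem pvContains_outer (record : List (String × List (List (String × List (List (String × String))))))
    (cs : PySem.Set String) (c : String) (hc : c ≠ "") :
    PySem.Set.contains
      (((PySem.Dict.mk record).getD "authorships" []).foldl (fun cs authorship =>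
        ((PySem.Dict.mk authorship).getD "institutions" []).foldl (fun cs inst =>
          let country := (PySem.Dict.mk inst).getD "country_code" ""
          if country ≠ "" then PySem.Set.add cs country else cs) cs) cs) c
      = (PySem.Set.contains cs c || pvHasCountry record c) := by
  unfold pvHasCountry
  induction ((PySem.Dict.mk record).getD "authorships" []) generalizing cs with
  | nil => simp
  | cons a t ih =>
    rw [List.foldl_cons, ih, pvContains_inner _ _ _ hc, List.any_cons, Bool.or_assoc]

-- ===== VERDICT (by name: the statement is the Claim_ definition above) =====
theorem is_germany_china_collaboration_py_spec : Claim_equal_is_germany_china_collaboration_py := by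
  intro record _
  unfold Spec_is_germany_china_collaboration_py
  simp only [is_germany_china_collaboration_py, is_germany_china_collaboration_py_alt,
    pvContains_outer record PySem.Set.empty "DE" (by decide),
    pvContains_outer record PySem.Set.empty "CN" (by decide)]
  simp [PySem.Set.contains, PySem.Set.empty]
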